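-- pv_equiv track=rewrite | github.com/JohnDMcMaster/open-tl866 | py/examples/eprom_read.py | addr_bits
-- ===== SOURCE A (Python) =====
-- ZIF_28TO40 = [1,  2,  3,  4,  5,  6,  7,  8,  9,  10, 11, 12, 13, 14, \
--                 27, 28, 29, 30, 31, 32, 33, 34, 35, 36, 37, 38, 39, 40]
--
-- A_LINES = [10, 9, 8, 7, 6, 5, 4, 3, 25, 24, 21, 23, 2, 26, 27]
--
-- def zif_to_int(ls):
--     i = 0
--     for bit in ls:
--         i = i + 2**(bit - 1)
--     return i
--
-- def eprom_to_int(pins):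
--     zif = [ZIF_28TO40[p - 1] for p in pins]
--     return zif_to_int(zif)
--
-- def addr_bits(adr):
--     tmp = adr
--     i = 0
--     hi_lines = []
--     adr_len = len(A_LINES)
--     while i < adr_len:
--         if tmp & 0x01:
--             hi_lines.append(A_LINES[i])
--
--         tmp = tmp >> 1
--         i = i + 1
--
--     return eprom_to_int(hi_lines)
-- ===== SOURCE B (Python) =====
-- # Table-driven nibble decomposition: four precomputed nibble lookup tables
-- # (one per four-bit slice of the address); addr_bits does four divmod steps plus lookups.
-- ZIF_28TO40 = [1,  2,  3,  4,  5,  6,  7,  8,  9,  10, 11, 12, 13, 14,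
--               27, 28, 29, 30, 31, 32, 33, 34, 35, 36, 37, 38, 39, 40]
--
-- A_LINES = [10, 9, 8, 7, 6, 5, 4, 3, 25, 24, 21, 23, 2, 26, 27]
--
-- _W = [2 ** (ZIF_28TO40[a - 1] - 1) for a in A_LINES]
--
-- _T = [[sum(w for j, w in enumerate(_W[lo:lo + 4]) if m >> j & 1)
--        for m in range(16)]
--       for lo in range(0, 15, 4)]
--
-- def addr_bits(adr):
--     total = 0
--     for tbl in _T:
--         adr, m = divmod(adr, 16)
--         total += tbl[m]
--     return total
-- ===== Notes on version B (the rewrite author's own statement) =====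
-- stated objective: alternative
-- what changed: Replaces the per-bit while-loop plus hi_lines/eprom_to_int/zif_to_int pipeline with four precomputed sixteen-entry nibble lookup tables: addr_bits does four divmod-by-sixteen steps and table lookups instead of fifteen bit tests.
import Mathlib
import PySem

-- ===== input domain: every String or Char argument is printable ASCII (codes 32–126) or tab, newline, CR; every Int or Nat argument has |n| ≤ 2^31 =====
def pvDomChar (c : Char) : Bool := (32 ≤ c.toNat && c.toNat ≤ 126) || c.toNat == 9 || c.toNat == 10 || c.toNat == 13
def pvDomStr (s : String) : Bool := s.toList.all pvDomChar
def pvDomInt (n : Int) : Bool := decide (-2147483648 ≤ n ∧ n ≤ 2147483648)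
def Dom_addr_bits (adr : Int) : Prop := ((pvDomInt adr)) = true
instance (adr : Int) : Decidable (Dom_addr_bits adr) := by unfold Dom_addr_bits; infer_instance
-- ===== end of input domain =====

-- B replaces A's per-bit while-loop and hi_lines/eprom_to_int/zif_to_int pipeline with four
-- precomputed sixteen-entry nibble lookup tables consumed by four divmod-by-sixteen steps; same values.

-- ===== PORT A =====
def ZIF_28TO40 : List Int := [1, 2, 3, 4, 5, 6, 7, 8, 9, 10, 11, 12, 13, 14,
  27, 28, 29, 30, 31, 32, 33, 34, 35, 36, 37, 38, 39, 40]

def A_LINES : List Int := [10, 9, 8, 7, 6, 5, 4, 3, 25, 24, 21, 23, 2, 26, 27]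

def zif_to_int (ls : List Int) : Int :=
  -- 2**(bit-1): exponent (bit-1) is nonnegative at every call site (ZIF pins ≥ 1), so .toNat is exact
  ls.foldl (fun i bit => i + 2 ^ (bit - 1).toNat) 0

def eprom_to_int (pins : List Int) : Int :=
  -- ZIF_28TO40[p - 1]: index in range at every call site (A_LINES values are 2..27), so getD 0 is exact
  zif_to_int (pins.map (fun p => PySem.List.pyGetD ZIF_28TO40 (p - 1) 0))

-- the while loop of addr_bits, recursing on i < adr_len; tmp >> 1 is tmp >>> (1:Nat)
def addr_bits_loop (tmp : Int) (i : Nat) (hi : List Int) : List Int :=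
  if i < A_LINES.length then
    addr_bits_loop (tmp >>> (1 : Nat)) (i + 1)
      (if PySem.Int.band tmp 1 ≠ 0 then hi ++ [PySem.List.pyGetD A_LINES (i : Int) 0] else hi)
  else hi
termination_by A_LINES.length - i

def addr_bits (adr : Int) : Int :=
  eprom_to_int (addr_bits_loop adr 0 [])

-- ===== PORT B =====
def B_ZIF_28TO40 : List Int := [1, 2, 3, 4, 5, 6, 7, 8, 9, 10, 11, 12, 13, 14,
  27, 28, 29, 30, 31, 32, 33, 34, 35, 36, 37, 38, 39, 40]

def B_A_LINES : List Int := [10, 9, 8, 7, 6, 5, 4, 3, 25, 24, 21, 23, 2, 26, 27]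

-- _W = [2 ** (ZIF_28TO40[a - 1] - 1) for a in A_LINES]  (index in range, exponent ≥ 0: getD/.toNat exact)
def B_W : List Int :=
  B_A_LINES.map (fun a => 2 ^ (PySem.List.pyGetD B_ZIF_28TO40 (a - 1) 0 - 1).toNat)

-- sum(w for j, w in enumerate(chunk) if m >> j & 1)  (the enumerate index j is ≥ 0)
def B_row (chunk : List Int) (m : Int) : Int :=
  (PySem.List.enumerate chunk 0).foldl
    (fun s jw => if PySem.Int.band (m >>> jw.1) 1 ≠ 0 then s + jw.2 else s) 0

-- _T = [[row for m in range(16)] for lo in range(0, 15, 4)]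
def B_T : List (List Int) :=
  (PySem.List.pyRange 0 15 4).map (fun lo =>
    (PySem.List.pyRange 0 16 1).map (fun m =>
      B_row (PySem.List.slice B_W (some lo) (some (lo + 4))) m))

def addr_bits_alt (adr : Int) : Int :=
  (B_T.foldl (fun st tbl =>
      let q := PySem.Int.floordiv st.1 16
      let m := PySem.Int.mod st.1 16
      (q, st.2 + PySem.List.pyGetD tbl m 0)) (adr, (0 : Int))).2

-- ===== PRECONDITION & SPEC =====
def Spec_addr_bits (adr : Int) (out : Int) : Prop := out = addr_bits_alt adr
instance (adr : Int) (out : Int) : Decidable (Spec_addr_bits adr out) := by unfold Spec_addr_bits; infer_instance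

-- ===== CLAIM (what is proved, stated in full; the proofs are below) =====
def Claim_equal_addr_bits : Prop := ∀ (adr : Int), Dom_addr_bits adr → Spec_addr_bits adr (addr_bits adr)

-- ===== LEMMAS AND PROOFS =====

-- the 15 per-position weights (= B_W, by decide where needed)
def WVALS : List Int := [512, 256, 128, 64, 32, 16, 8, 4, 68719476736, 34359738368,
  4294967296, 17179869184, 2, 137438953472, 274877906944]

-- common normal form: sum of the weights at the set low bits, halving per step
def tailSum (t : Int) : List Int → Int
  | [] => 0
  | v :: rest => (if t % 2 = 1 then v else 0) + tailSum (t / 2) rest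

-- symbolic 16-entry table over a 4-weight chunk (bit 3 = weight d)
def tbl4 (a b c d : Int) : List Int :=
  [0, a, b, a + b, c, a + c, b + c, a + b + c,
   d, a + d, b + d, a + b + d, c + d, a + c + d, b + c + d, a + b + c + d]

-- symbolic 16-entry table over a 3-weight chunk (bit 3 ignored)
def tbl3 (a b c : Int) : List Int :=
  [0, a, b, a + b, c, a + c, b + c, a + b + c,
   0, a, b, a + b, c, a + c, b + c, a + b + c]

lemma shift1_eq_div2 (x : Int) : x >>> (1 : Nat) = x / 2 := by
  rw [Int.shiftRight_eq_div_pow]; norm_num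

lemma band1_eq_mod2 (x : Int) : PySem.Int.band x 1 = x % 2 := by
  rw [PySem.Int.band_one, PySem.Int.mod_eq_emod_of_pos (by norm_num)]

lemma eprom_to_int_append_singleton (hi : List Int) (x : Int) :
    eprom_to_int (hi ++ [x]) = eprom_to_int hi + 2 ^ (PySem.List.pyGetD ZIF_28TO40 (x - 1) 0 - 1).toNat := by
  simp [eprom_to_int, zif_to_int, PySem.List.foldl_add, List.map_append]

lemma wval_at (i : Nat) (h : i < 15) :
    (2 : Int) ^ (PySem.List.pyGetD ZIF_28TO40 (PySem.List.pyGetD A_LINES (i : Int) 0 - 1) 0 - 1).toNat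
      = PySem.List.pyGetD WVALS (i : Int) 0 := by
  interval_cases i <;> decide

lemma wvals_drop (i : Nat) (h : i < 15) :
    WVALS.drop i = PySem.List.pyGetD WVALS (i : Int) 0 :: WVALS.drop (i + 1) := by
  interval_cases i <;> decide

lemma addr_bits_loop_sum (k : Nat) : ∀ (i : Nat), i + k = 15 → ∀ (tmp : Int) (hi : List Int),
    eprom_to_int (addr_bits_loop tmp i hi) = eprom_to_int hi + tailSum tmp (WVALS.drop i) := by
  induction k with
  | zero =>
    intro i hik tmp hi
    have hi15 : i = 15 := by omega
    subst hi15
    rw [addr_bits_loop]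
    norm_num [A_LINES, tailSum, WVALS]
  | succ k ih =>
    intro i hik tmp hi
    have hlt : i < A_LINES.length := by simp [A_LINES]; omega
    rw [addr_bits_loop, if_pos hlt, ih (i + 1) (by omega)]
    rw [wvals_drop i (by omega), shift1_eq_div2]
    show _ = eprom_to_int hi +
      ((if tmp % 2 = 1 then PySem.List.pyGetD WVALS (i : Int) 0 else 0) +
        tailSum (tmp / 2) (WVALS.drop (i + 1)))
    have hb : (PySem.Int.band tmp 1 ≠ 0) ↔ tmp % 2 = 1 := by
      rw [band1_eq_mod2]; omega
    by_cases hcase : tmp % 2 = 1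
    · rw [if_pos (hb.mpr hcase), if_pos hcase, eprom_to_int_append_singleton, wval_at i (by omega)]
      ring
    · rw [if_neg (fun h => hcase (hb.mp h)), if_neg hcase]
      ring

-- table lookup = bit-sum, for a bounded literal index
lemma tbl4_lookup (a b c d m : Int) (h0 : 0 ≤ m) (h1 : m < 16) :
    PySem.List.pyGetD (tbl4 a b c d) m 0 =
      (if m % 2 = 1 then a else 0) + ((if m / 2 % 2 = 1 then b else 0) +
        ((if m / 2 / 2 % 2 = 1 then c else 0) + ((if m / 2 / 2 / 2 % 2 = 1 then d else 0) + 0))) := by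
  interval_cases m <;> simp [tbl4, PySem.List.pyGetD] <;> ring

lemma tbl3_lookup (a b c m : Int) (h0 : 0 ≤ m) (h1 : m < 16) :
    PySem.List.pyGetD (tbl3 a b c) m 0 =
      (if m % 2 = 1 then a else 0) + ((if m / 2 % 2 = 1 then b else 0) +
        ((if m / 2 / 2 % 2 = 1 then c else 0) + 0)) := by
  interval_cases m <;> simp [tbl3, PySem.List.pyGetD] <;> ring

lemma nib4 (x a b c d : Int) :
    tailSum x [a, b, c, d] = PySem.List.pyGetD (tbl4 a b c d) (x % 16) 0 := by
  rw [tbl4_lookup a b c d (x % 16) (by omega) (by omega)]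
  simp only [tailSum]
  rw [show x % 16 % 2 = x % 2 from by omega,
    show x % 16 / 2 % 2 = x / 2 % 2 from by omega,
    show x % 16 / 2 / 2 % 2 = x / 2 / 2 % 2 from by omega,
    show x % 16 / 2 / 2 / 2 % 2 = x / 2 / 2 / 2 % 2 from by omega]

lemma nib3 (x a b c : Int) :
    tailSum x [a, b, c] = PySem.List.pyGetD (tbl3 a b c) (x % 16) 0 := by
  rw [tbl3_lookup a b c (x % 16) (by omega) (by omega)]
  simp only [tailSum]
  rw [show x % 16 % 2 = x % 2 from by omega,
    show x % 16 / 2 % 2 = x / 2 % 2 from by omega,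
    show x % 16 / 2 / 2 % 2 = x / 2 / 2 % 2 from by omega]

-- B_T computes exactly the four symbolic tables at the concrete weights
lemma bT_lit : B_T = [tbl4 512 256 128 64, tbl4 32 16 8 4,
    tbl4 68719476736 34359738368 4294967296 17179869184, tbl3 2 137438953472 274877906944] := by
  decide

lemma tailSum_wvals (x : Int) :
    tailSum x WVALS =
      PySem.List.pyGetD (tbl4 512 256 128 64) (x % 16) 0 +
        (PySem.List.pyGetD (tbl4 32 16 8 4) (x / 16 % 16) 0 +
          (PySem.List.pyGetD (tbl4 68719476736 34359738368 4294967296 17179869184) (x / 16 / 16 % 16) 0 +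
            PySem.List.pyGetD (tbl3 2 137438953472 274877906944) (x / 16 / 16 / 16 % 16) 0)) := by
  rw [← nib4 x 512 256 128 64, ← nib4 (x / 16) 32 16 8 4,
    ← nib4 (x / 16 / 16) 68719476736 34359738368 4294967296 17179869184,
    ← nib3 (x / 16 / 16 / 16) 2 137438953472 274877906944]
  simp only [tailSum, WVALS]
  rw [show x / 2 / 2 / 2 / 2 = x / 16 from by omega,
    show x / 16 / 2 / 2 / 2 / 2 = x / 16 / 16 from by omega,
    show x / 16 / 16 / 2 / 2 / 2 / 2 = x / 16 / 16 / 16 from by omega]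
  ring

lemma alt_eq (adr : Int) :
    addr_bits_alt adr =
      PySem.List.pyGetD (tbl4 512 256 128 64) (adr % 16) 0 +
        (PySem.List.pyGetD (tbl4 32 16 8 4) (adr / 16 % 16) 0 +
          (PySem.List.pyGetD (tbl4 68719476736 34359738368 4294967296 17179869184) (adr / 16 / 16 % 16) 0 +
            PySem.List.pyGetD (tbl3 2 137438953472 274877906944) (adr / 16 / 16 / 16 % 16) 0)) := by
  rw [addr_bits_alt, bT_lit]
  simp only [List.foldl]
  rw [PySem.Int.mod_eq_emod_of_pos (by norm_num), PySem.Int.floordiv_eq_ediv_of_pos (by norm_num)]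
  rw [PySem.Int.mod_eq_emod_of_pos (by norm_num), PySem.Int.floordiv_eq_ediv_of_pos (by norm_num)]
  rw [PySem.Int.mod_eq_emod_of_pos (by norm_num), PySem.Int.floordiv_eq_ediv_of_pos (by norm_num)]
  rw [PySem.Int.mod_eq_emod_of_pos (by norm_num)]
  ring

-- ===== VERDICT (by name: the statement is the Claim_ definition above) =====
theorem addr_bits_spec : Claim_equal_addr_bits := by
  intro adr _
  show addr_bits adr = addr_bits_alt adr
  rw [alt_eq, ← tailSum_wvals, addr_bits]
  have h := addr_bits_loop_sum 15 0 rfl adr []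
  simpa [eprom_to_int, zif_to_int] using h
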